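-- pv_equiv track=rewrite | github.com/Caionickpi/aqw-discord-bot | bot.py | build_class_rank
-- ===== SOURCE A (Python) =====
-- def build_class_rank(points: int) -> int:
--     ranks = [0]
--     for index in range(1, 10):
--         points_to_rank = ((index + 1) ** 3) * 100
--         if index > 1:
--             ranks.append(points_to_rank + ranks[index - 1])
--         else:
--             ranks.append(points_to_rank + 100)
--
--     rank = 1
--     for threshold in ranks[1:]:
--         if points < threshold:
--             return rank
--         rank += 1
--     return rank
-- ===== SOURCE B (Python) =====
-- import bisect
--
-- _THRESHOLDS = [900, 3600, 10000, 22500, 44100, 78400, 129600, 202500, 302500]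
--
-- def build_class_rank(points: int) -> int:
--     return bisect.bisect_right(_THRESHOLDS, points) + 1
-- ===== Notes on version B (the rewrite author's own statement) =====
-- stated objective: idiomatic
-- what changed: Replaces the per-call rank-table-building loop plus linear threshold scan with a precomputed constant threshold table and a binary search (bisect_right) returning its index + 1.
import Mathlib
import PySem

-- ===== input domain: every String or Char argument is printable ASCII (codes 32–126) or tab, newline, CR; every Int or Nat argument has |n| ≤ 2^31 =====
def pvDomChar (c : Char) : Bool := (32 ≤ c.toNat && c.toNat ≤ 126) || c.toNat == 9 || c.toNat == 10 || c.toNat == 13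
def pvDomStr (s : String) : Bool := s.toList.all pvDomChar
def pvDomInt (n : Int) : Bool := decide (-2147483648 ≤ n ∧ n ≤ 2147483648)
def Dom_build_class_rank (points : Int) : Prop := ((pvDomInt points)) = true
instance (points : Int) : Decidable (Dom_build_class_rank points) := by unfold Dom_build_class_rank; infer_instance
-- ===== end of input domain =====

-- B replaces A's per-call table-building loop and linear scan with a constant
-- threshold table and a binary search (bisect_right) + 1 (idiomatic).

-- ===== PORT A =====
-- second loop of A: scan ranks[1:] with a running rank counter
def pvScanA (points : Int) (rank : Int) : List Int → Int
  | [] => rank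
  | threshold :: rest =>
      if points < threshold then rank else pvScanA points (rank + 1) rest

-- first loop of A: build ranks by folding over range(1, 10)
def pvRanksA : List Int :=
  (PySem.List.pyRange 1 10 1).foldl
      (fun ranks index =>
        let points_to_rank := ((index + 1) ^ 3) * 100
        if index > 1 then
        ranks ++ [points_to_rank + (PySem.List.pyGet? ranks (index - 1)).getD 0]
      else
        ranks ++ [points_to_rank + 100])
    [0]

def build_class_rank (points : Int) : Int :=
  pvScanA points 1 (PySem.List.slice pvRanksA (some 1) none)

-- ===== PORT B =====
def pvThresholds : List Int := [900, 3600, 10000, 22500, 44100, 78400, 129600, 202500, 302500]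

-- bisect.bisect_right: binary search for the insertion point after equal elements
def pvBisectRight (a : List Int) (x : Int) (lo hi : Nat) : Nat :=
  if h : lo < hi then
    let mid := (lo + hi) / 2
    if x < (PySem.List.pyGet? a (mid : Int)).getD 0 then
      pvBisectRight a x lo mid
    else
      pvBisectRight a x (mid + 1) hi
  else lo
  termination_by hi - lo
  decreasing_by all_goals omega

def build_class_rank_alt (points : Int) : Int :=
  (pvBisectRight pvThresholds points 0 pvThresholds.length : Int) + 1

-- ===== PRECONDITION & SPEC =====
def Spec_build_class_rank (points : Int) (out : Int) : Prop := out = build_class_rank_alt points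
instance (points : Int) (out : Int) : Decidable (Spec_build_class_rank points out) := by unfold Spec_build_class_rank; infer_instance

-- ===== CLAIM (what is proved, stated in full; the proofs are below) =====
def Claim_equal_build_class_rank : Prop := ∀ (points : Int), Dom_build_class_rank points → Spec_build_class_rank points (build_class_rank points)

-- ===== LEMMAS AND PROOFS =====
theorem pvRanksA_eq : pvRanksA = [0, 900, 3600, 10000, 22500, 44100, 78400, 129600, 202500, 302500] := by decide

-- ===== VERDICT (by name: the statement is the Claim_ definition above) =====
set_option maxRecDepth 10000 in
theorem build_class_rank_spec : Claim_equal_build_class_rank := by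
  intro points _
  unfold Spec_build_class_rank build_class_rank build_class_rank_alt
  rw [pvRanksA_eq]
  simp [pvScanA, pvBisectRight, pvThresholds, PySem.List.slice_from_one,
    PySem.List.pyGet?, PySem.List.pyIdx?]
  split_ifs <;> omega
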